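-- pv_equiv track=rewrite | github.com/SophieHsu/3d-plan-eval | lsi_3d/planners/a_star_planner.py | get_neighbor_locs
-- ===== SOURCE A (Python) =====
-- def get_neighbor_locs(loc):
--     relative_neighbor_locs = [(-1, -1), (-1, 0), (-1, 1), (0, -1), (0, 1), (1, -1), (1, 0), (1, 1)]
--     # relative_neighbor_locs = [ (-1, 0), (0, -1), (0, 1), (1, 0)]
--     neighbor_locs = []
--     for n in relative_neighbor_locs:
--         x_neighbor = loc[0] + n[0]
--         y_neighbor = loc[1] + n[1]
--
--         if 0 <= x_neighbor < 8 and 0 <= y_neighbor < 8: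
--             neighbor_locs.append((x_neighbor, y_neighbor))
--     return neighbor_locs
-- ===== SOURCE B (Python) =====
-- def get_neighbor_locs(loc):
--     neighbor_locs = []
--     for i in range(max(0, loc[0] - 1), min(8, loc[0] + 2)):
--         for j in range(max(0, loc[1] - 1), min(8, loc[1] + 2)):
--             if (i, j) != (loc[0], loc[1]):
--                 neighbor_locs.append((i, j))
--     return neighbor_locs
-- ===== Notes on version B (the rewrite author's own statement) =====
-- stated objective: simpler
-- what changed: Replaces the fixed list of 8 relative offsets with per-neighbor bounds checks by a nested loop over the clamped row and column ranges, skipping only the center cell.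
import Mathlib
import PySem

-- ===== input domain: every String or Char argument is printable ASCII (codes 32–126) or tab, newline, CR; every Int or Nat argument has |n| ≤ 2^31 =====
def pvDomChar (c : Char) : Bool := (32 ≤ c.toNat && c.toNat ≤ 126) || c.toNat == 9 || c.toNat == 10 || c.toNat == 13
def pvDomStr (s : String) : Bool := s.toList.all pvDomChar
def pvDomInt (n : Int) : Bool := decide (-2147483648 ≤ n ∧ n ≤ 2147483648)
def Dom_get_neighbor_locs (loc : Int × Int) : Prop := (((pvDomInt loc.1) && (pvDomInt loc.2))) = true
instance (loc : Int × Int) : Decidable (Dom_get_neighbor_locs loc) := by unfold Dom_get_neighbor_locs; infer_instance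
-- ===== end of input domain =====

-- B enumerates the clamped row/column ranges directly and skips the center, instead of
-- testing bounds for each of 8 fixed offsets (objective: simpler).


-- ===== PORT A =====
def get_neighbor_locs (loc : Int × Int) : List (Int × Int) :=
  let relative_neighbor_locs : List (Int × Int) :=
    [(-1, -1), (-1, 0), (-1, 1), (0, -1), (0, 1), (1, -1), (1, 0), (1, 1)]
  relative_neighbor_locs.foldl (fun neighbor_locs n =>
    let x_neighbor := loc.1 + n.1
    let y_neighbor := loc.2 + n.2
    if 0 ≤ x_neighbor ∧ x_neighbor < 8 ∧ 0 ≤ y_neighbor ∧ y_neighbor < 8 then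
      neighbor_locs ++ [(x_neighbor, y_neighbor)]
    else neighbor_locs) []

-- ===== PORT B =====
def get_neighbor_locs_alt (loc : Int × Int) : List (Int × Int) :=
  (PySem.List.pyRange (max 0 (loc.1 - 1)) (min 8 (loc.1 + 2)) 1).foldl (fun acc i =>
    (PySem.List.pyRange (max 0 (loc.2 - 1)) (min 8 (loc.2 + 2)) 1).foldl (fun acc j =>
      if (i, j) ≠ (loc.1, loc.2) then acc ++ [(i, j)] else acc) acc) []

-- ===== PRECONDITION & SPEC =====
def Spec_get_neighbor_locs (loc : Int × Int) (out : List (Int × Int)) : Prop := out = get_neighbor_locs_alt loc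
instance (loc : Int × Int) (out : List (Int × Int)) : Decidable (Spec_get_neighbor_locs loc out) := by unfold Spec_get_neighbor_locs; infer_instance

-- ===== CLAIM (what is proved, stated in full; the proofs are below) =====
def Claim_equal_get_neighbor_locs : Prop := ∀ (loc : Int × Int), Dom_get_neighbor_locs loc → Spec_get_neighbor_locs loc (get_neighbor_locs loc)

-- ===== LEMMAS AND PROOFS =====

-- Outside rows -1..8 (resp. columns -1..8) both programs return []: every offset fails
-- A's bounds test, and B's clamped row (resp. column) range is empty.
lemma a_empty_x (loc : Int × Int) (h : loc.1 ≤ -2 ∨ 9 ≤ loc.1) : get_neighbor_locs loc = [] := by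
  simp only [get_neighbor_locs, List.foldl]
  rw [if_neg (by omega), if_neg (by omega), if_neg (by omega), if_neg (by omega),
      if_neg (by omega), if_neg (by omega), if_neg (by omega), if_neg (by omega)]

lemma a_empty_y (loc : Int × Int) (h : loc.2 ≤ -2 ∨ 9 ≤ loc.2) : get_neighbor_locs loc = [] := by
  simp only [get_neighbor_locs, List.foldl]
  rw [if_neg (by omega), if_neg (by omega), if_neg (by omega), if_neg (by omega),
      if_neg (by omega), if_neg (by omega), if_neg (by omega), if_neg (by omega)]

lemma foldl_skip {α : Type} (g : List (Int × Int) → α → List (Int × Int)) (l : List α)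
    (init : List (Int × Int)) (hg : ∀ acc a, g acc a = acc) : l.foldl g init = init := by
  induction l generalizing init with
  | nil => rfl
  | cons a t ih => rw [List.foldl_cons, hg]; exact ih init

lemma b_empty_x (loc : Int × Int) (h : loc.1 ≤ -2 ∨ 9 ≤ loc.1) : get_neighbor_locs_alt loc = [] := by
  simp only [get_neighbor_locs_alt]
  rw [PySem.List.pyRange_one_eq_nil (a := max 0 (loc.1 - 1)) (b := min 8 (loc.1 + 2)) (by omega)]
  rfl

lemma b_empty_y (loc : Int × Int) (h : loc.2 ≤ -2 ∨ 9 ≤ loc.2) : get_neighbor_locs_alt loc = [] := by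
  simp only [get_neighbor_locs_alt]
  rw [PySem.List.pyRange_one_eq_nil (a := max 0 (loc.2 - 1)) (b := min 8 (loc.2 + 2)) (by omega)]
  exact foldl_skip _ _ _ (fun acc a => rfl)

-- ===== VERDICT (by name: the statement is the Claim_ definition above) =====
theorem get_neighbor_locs_spec : Claim_equal_get_neighbor_locs := by
  intro loc _
  unfold Spec_get_neighbor_locs
  obtain ⟨x, y⟩ := loc
  by_cases hx : -1 ≤ x ∧ x ≤ 8
  · by_cases hy : -1 ≤ y ∧ y ≤ 8
    · obtain ⟨hx1, hx2⟩ := hx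
      obtain ⟨hy1, hy2⟩ := hy
      interval_cases x <;> interval_cases y <;> decide
    · rw [a_empty_y (x, y) (by dsimp only; omega), b_empty_y (x, y) (by dsimp only; omega)]
  · rw [a_empty_x (x, y) (by dsimp only; omega), b_empty_x (x, y) (by dsimp only; omega)]
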